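-- pv_equiv track=rewrite | github.com/YichuanAlex/CTA_Trading_Platform | strategy/source_code/test/test_sample_strategy_lite.py | _select_with_priority
-- ===== SOURCE A (Python) =====
-- from typing import Dict, List, Tuple, Any, Optional
--
-- def _select_with_priority(candidates: List[Tuple[str, Any]], held_roots: set,
--                            target_count: int, reverse: bool = False) -> List[Tuple[str, Any]]:
--     """优先保留已持仓的选择逻辑"""
--     result = []
--     selected = set()
--
--     # 先选已持仓的
--     for k, v in candidates:
--         if k in held_roots:
--             result.append((k, v))
--             selected.add(k)
--
--     # 补充新标的
--     for k, v in candidates: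
--         if len(result) >= target_count:
--             break
--         if k not in selected:
--             result.append((k, v))
--             selected.add(k)
--
--     return result[:target_count]
-- ===== SOURCE B (Python) =====
-- from typing import Dict, List, Tuple, Any, Optional
--
-- def _select_with_priority(candidates: List[Tuple[str, Any]], held_roots: set,
--                            target_count: int, reverse: bool = False) -> List[Tuple[str, Any]]:
--     """Single partitioning pass, then slice arithmetic."""
--     held = []
--     new = []
--     seen = set()
--     for k, v in candidates:
--         if k in held_roots:
--             held.append((k, v))
--         elif k not in seen:
--             new.append((k, v))
--             seen.add(k)
--     n_take = max(0, target_count - len(held))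
--     return (held + new[:n_take])[:target_count]
-- ===== Notes on version B (the rewrite author's own statement) =====
-- stated objective: alternative
-- what changed: Replaces A's two scans over candidates (held pass, then a guarded-append/break refill pass) with one partitioning pass into held/new lists plus slice arithmetic for how many new items to take.
import Mathlib
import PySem

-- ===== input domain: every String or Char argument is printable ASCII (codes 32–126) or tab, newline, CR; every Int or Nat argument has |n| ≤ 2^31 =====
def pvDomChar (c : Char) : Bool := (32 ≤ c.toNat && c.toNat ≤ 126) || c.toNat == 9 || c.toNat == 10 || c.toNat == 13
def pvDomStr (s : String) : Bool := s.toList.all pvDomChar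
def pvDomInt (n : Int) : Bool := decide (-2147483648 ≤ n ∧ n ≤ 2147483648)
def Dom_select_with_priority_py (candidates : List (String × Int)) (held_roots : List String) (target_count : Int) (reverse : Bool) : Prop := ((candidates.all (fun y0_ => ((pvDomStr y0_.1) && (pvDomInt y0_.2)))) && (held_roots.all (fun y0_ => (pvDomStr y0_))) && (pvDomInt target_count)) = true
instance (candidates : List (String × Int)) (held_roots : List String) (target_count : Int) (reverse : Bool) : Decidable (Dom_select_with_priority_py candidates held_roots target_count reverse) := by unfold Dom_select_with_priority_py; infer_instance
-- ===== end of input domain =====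

-- B replaces A's two candidate scans (held pass + guarded-append/break refill pass) by one
-- partitioning pass plus slice arithmetic; return values are proved equal on the whole domain.


-- ===== PORT A =====
-- second loop of A: break when len(result) >= target_count, else append unseen keys
def pvALoop2 (target : Int) : List (String × Int) → List (String × Int) → PySem.Set String → List (String × Int)
  | [], result, _ => result
  | kv :: rest, result, sel =>
    if target ≤ (result.length : Int) then result
    else if PySem.Set.contains sel kv.1 = false then
      pvALoop2 target rest (result ++ [kv]) (PySem.Set.add sel kv.1)
    else
      pvALoop2 target rest result sel

def select_with_priority_py (candidates : List (String × Int)) (held_roots : List String) (target_count : Int) (reverse : Bool) : List (String × Int) :=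
  -- first loop: collect held candidates into result, record keys in selected
  let st := candidates.foldl
    (fun (st : List (String × Int) × PySem.Set String) kv =>
      if held_roots.contains kv.1 then (st.1 ++ [kv], PySem.Set.add st.2 kv.1) else st)
    ([], PySem.Set.empty)
  PySem.List.slice (pvALoop2 target_count candidates st.1 st.2) none (some target_count)

-- ===== PORT B =====
def select_with_priority_py_alt (candidates : List (String × Int)) (held_roots : List String) (target_count : Int) (reverse : Bool) : List (String × Int) :=
  -- single partitioning pass: held keeps duplicates, new is deduplicated via seen
  let st := candidates.foldl
    (fun (st : List (String × Int) × List (String × Int) × PySem.Set String) kv =>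
      if held_roots.contains kv.1 then (st.1 ++ [kv], st.2.1, st.2.2)
      else if PySem.Set.contains st.2.2 kv.1 = false then
        (st.1, st.2.1 ++ [kv], PySem.Set.add st.2.2 kv.1)
      else st)
    ([], [], PySem.Set.empty)
  let n_take := max 0 (target_count - (st.1.length : Int))
  PySem.List.slice (st.1 ++ PySem.List.slice st.2.1 none (some n_take)) none (some target_count)

-- ===== PRECONDITION & SPEC =====
def Spec_select_with_priority_py (candidates : List (String × Int)) (held_roots : List String) (target_count : Int) (reverse : Bool) (out : List (String × Int)) : Prop := out = select_with_priority_py_alt candidates held_roots target_count reverse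
instance (candidates : List (String × Int)) (held_roots : List String) (target_count : Int) (reverse : Bool) (out : List (String × Int)) : Decidable (Spec_select_with_priority_py candidates held_roots target_count reverse out) := by unfold Spec_select_with_priority_py; infer_instance

-- ===== CLAIM (what is proved, stated in full; the proofs are below) =====
def Claim_equal_select_with_priority_py : Prop := ∀ (candidates : List (String × Int)) (held_roots : List String) (target_count : Int) (reverse : Bool), Dom_select_with_priority_py candidates held_roots target_count reverse → Spec_select_with_priority_py candidates held_roots target_count reverse (select_with_priority_py candidates held_roots target_count reverse)

-- ===== LEMMAS AND PROOFS =====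

-- the list of new (non-held, first-occurrence) candidates, relative to a seen-set
def pvNewOf (hr : List String) : List (String × Int) → PySem.Set String → List (String × Int)
  | [], _ => []
  | kv :: rest, seen =>
    if hr.contains kv.1 then pvNewOf hr rest seen
    else if PySem.Set.contains seen kv.1 = false then kv :: pvNewOf hr rest (PySem.Set.add seen kv.1)
    else pvNewOf hr rest seen

def pvHeldOf (hr : List String) (cs : List (String × Int)) : List (String × Int) :=
  cs.filter (fun kv => hr.contains kv.1)

-- A's first loop: result component
lemma foldA_fst (hr : List String) : ∀ (cs : List (String × Int)) (r : List (String × Int)) (s : PySem.Set String),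
    (cs.foldl (fun (st : List (String × Int) × PySem.Set String) kv =>
        if hr.contains kv.1 then (st.1 ++ [kv], PySem.Set.add st.2 kv.1) else st) (r, s)).1
      = r ++ pvHeldOf hr cs := by
  intro cs
  induction cs with
  | nil => intro r s; simp [pvHeldOf]
  | cons kv rest ih =>
    intro r s
    by_cases h : hr.contains kv.1 = true
    · have hm : kv.1 ∈ hr := List.contains_iff_mem.1 h
      simp only [List.foldl_cons, if_pos h, ih]
      simp [pvHeldOf, hm]
    · have hm : kv.1 ∉ hr := fun hx => h (List.contains_iff_mem.2 hx)
      simp only [List.foldl_cons, if_neg h, ih]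
      simp [pvHeldOf, hm]

-- A's first loop: every key already in the seen set stays in it
lemma foldA_snd_mono (hr : List String) : ∀ (cs : List (String × Int)) (r : List (String × Int)) (s : PySem.Set String) (k : String),
    k ∈ s →
    k ∈ (cs.foldl (fun (st : List (String × Int) × PySem.Set String) kv =>
        if hr.contains kv.1 then (st.1 ++ [kv], PySem.Set.add st.2 kv.1) else st) (r, s)).2 := by
  intro cs
  induction cs with
  | nil => intro r s k hk; simpa using hk
  | cons kv rest ih =>
    intro r s k hk
    by_cases h : hr.contains kv.1 = true
    · simp only [List.foldl_cons, if_pos h]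
      exact ih _ _ k ((PySem.Set.mem_add s kv.1 k).2 (Or.inl hk))
    · simp only [List.foldl_cons, if_neg h]
      exact ih _ _ k hk

-- A's first loop: every held key of the candidates ends up in the seen set
lemma foldA_snd_mem (hr : List String) : ∀ (cs : List (String × Int)) (r : List (String × Int)) (s : PySem.Set String) (k : String) (v : Int),
    (k, v) ∈ cs → k ∈ hr →
    k ∈ (cs.foldl (fun (st : List (String × Int) × PySem.Set String) kv =>
        if hr.contains kv.1 then (st.1 ++ [kv], PySem.Set.add st.2 kv.1) else st) (r, s)).2 := by
  intro cs
  induction cs with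
  | nil => intro r s k v hmem; simp at hmem
  | cons kv rest ih =>
    intro r s k v hmem hk
    rcases List.mem_cons.1 hmem with heq | htail
    · have hc : hr.contains kv.1 = true := by
        subst heq; exact List.contains_iff_mem.2 hk
      simp only [List.foldl_cons, if_pos hc]
      exact foldA_snd_mono hr rest _ _ k
        ((PySem.Set.mem_add s kv.1 k).2 (Or.inr (by subst heq; rfl)))
    · by_cases h : hr.contains kv.1 = true
      · simp only [List.foldl_cons, if_pos h]
        exact ih _ _ k v htail hk
      · simp only [List.foldl_cons, if_neg h]
        exact ih _ _ k v htail hk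

-- A's first loop: the seen set only contains held keys
lemma foldA_snd_sub (hr : List String) : ∀ (cs : List (String × Int)) (r : List (String × Int)) (s : PySem.Set String),
    (∀ k : String, k ∈ s → k ∈ hr) →
    ∀ k : String,
      k ∈ (cs.foldl (fun (st : List (String × Int) × PySem.Set String) kv =>
        if hr.contains kv.1 then (st.1 ++ [kv], PySem.Set.add st.2 kv.1) else st) (r, s)).2 → k ∈ hr := by
  intro cs
  induction cs with
  | nil => intro r s hs k hk; exact hs k (by simpa using hk)
  | cons kv rest ih =>
    intro r s hs k hk
    by_cases h : hr.contains kv.1 = true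
    · simp only [List.foldl_cons, if_pos h] at hk
      refine ih _ _ ?_ k hk
      intro k' hk'
      rcases (PySem.Set.mem_add s kv.1 k').1 hk' with h1 | h2
      · exact hs k' h1
      · subst h2; exact List.contains_iff_mem.1 h
    · simp only [List.foldl_cons, if_neg h] at hk
      exact ih _ _ hs k hk

-- A's second loop appends exactly a prefix of the non-held first occurrences
lemma loop2_eq (hr : List String) (t : Int) : ∀ (cs : List (String × Int)) (r : List (String × Int)) (s : PySem.Set String),
    (∀ (k : String) (v : Int), (k, v) ∈ cs → k ∈ hr → k ∈ s) →
    pvALoop2 t cs r s = r ++ (pvNewOf hr cs s).take (t - r.length).toNat := by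
  intro cs
  induction cs with
  | nil => intro r s _; simp [pvALoop2, pvNewOf]
  | cons kv rest ih =>
    intro r s H
    obtain ⟨k, v⟩ := kv
    by_cases hstop : t ≤ (r.length : Int)
    · have h0 : (t - (r.length : Int)).toNat = 0 := by omega
      simp [pvALoop2, hstop, h0]
    · have Hrest : ∀ (k' : String) (v' : Int), (k', v') ∈ rest → k' ∈ hr → k' ∈ s :=
        fun k' v' hm hk' => H k' v' (List.mem_cons_of_mem _ hm) hk'
      by_cases hk : k ∈ hr
      · have hks : k ∈ s := H k v List.mem_cons_self hk
        have eA : pvALoop2 t ((k, v) :: rest) r s = pvALoop2 t rest r s := by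
          simp [pvALoop2, hstop, hks]
        have eN : pvNewOf hr ((k, v) :: rest) s = pvNewOf hr rest s := by
          simp [pvNewOf, hk]
        rw [eA, eN]; exact ih r s Hrest
      · have hchr : hr.contains k = false := by
          simpa [List.contains_iff_mem] using hk
        by_cases hks : k ∈ s
        · have eA : pvALoop2 t ((k, v) :: rest) r s = pvALoop2 t rest r s := by
            simp [pvALoop2, hstop, hks]
          have eN : pvNewOf hr ((k, v) :: rest) s = pvNewOf hr rest s := by
            simp [pvNewOf, hk, hks]
          rw [eA, eN]; exact ih r s Hrest
        · have eA : pvALoop2 t ((k, v) :: rest) r s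
              = pvALoop2 t rest (r ++ [(k, v)]) (PySem.Set.add s k) := by
            simp [pvALoop2, hstop, hks]
          have eN : pvNewOf hr ((k, v) :: rest) s = (k, v) :: pvNewOf hr rest (PySem.Set.add s k) := by
            simp [pvNewOf, hk, hks]
          have Hnext : ∀ (k' : String) (v' : Int), (k', v') ∈ rest → k' ∈ hr → k' ∈ PySem.Set.add s k :=
            fun k' v' hm hk' => (PySem.Set.mem_add s k k').2 (Or.inl (Hrest k' v' hm hk'))
          rw [eA, eN, ih (r ++ [(k, v)]) (PySem.Set.add s k) Hnext]
          have hn : (t - (r.length : Int)).toNat = (t - ((r ++ [(k, v)]).length : Int)).toNat + 1 := by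
            simp only [List.length_append, List.length_cons, List.length_nil]
            omega
          rw [hn, List.take_succ_cons, List.append_assoc]
          rfl

-- seen sets that agree outside hr produce the same new-list
lemma newOf_congr (hr : List String) : ∀ (cs : List (String × Int)) (s1 s2 : PySem.Set String),
    (∀ k : String, k ∉ hr → (k ∈ s1 ↔ k ∈ s2)) → pvNewOf hr cs s1 = pvNewOf hr cs s2 := by
  intro cs
  induction cs with
  | nil => intro s1 s2 _; simp [pvNewOf]
  | cons kv rest ih =>
    intro s1 s2 hagree
    by_cases hk : kv.1 ∈ hr
    · have hchr : hr.contains kv.1 = true := List.contains_iff_mem.2 hk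
      simp only [pvNewOf, if_pos hchr]
      exact ih s1 s2 hagree
    · have hchr : hr.contains kv.1 = false := by simpa [List.contains_iff_mem] using hk
      by_cases hs1 : kv.1 ∈ s1
      · have hc1 : PySem.Set.contains s1 kv.1 = true := by
          simpa [PySem.Set.contains, List.contains_iff_mem] using hs1
        have hc2 : PySem.Set.contains s2 kv.1 = true := by
          simpa [PySem.Set.contains, List.contains_iff_mem] using (hagree kv.1 hk).1 hs1
        simp only [pvNewOf, hchr, hc1, hc2]
        simp only [Bool.false_eq_true, if_false, reduceIte]
        exact ih s1 s2 hagree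
      · have hs2 : kv.1 ∉ s2 := fun hx => hs1 ((hagree kv.1 hk).2 hx)
        have hc1 : PySem.Set.contains s1 kv.1 = false := by
          simpa [PySem.Set.contains, List.contains_iff_mem] using hs1
        have hc2 : PySem.Set.contains s2 kv.1 = false := by
          simpa [PySem.Set.contains, List.contains_iff_mem] using hs2
        simp only [pvNewOf, hchr, hc1, hc2]
        simp only [Bool.false_eq_true, if_false, reduceIte]
        congr 1
        refine ih _ _ ?_
        intro k' hk'
        rw [PySem.Set.mem_add, PySem.Set.mem_add]
        exact or_congr (hagree k' hk') Iff.rfl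

-- B's fold: held component
lemma foldB_fst (hr : List String) : ∀ (cs : List (String × Int)) (h : List (String × Int)) (n : List (String × Int)) (s : PySem.Set String),
    (cs.foldl (fun (st : List (String × Int) × List (String × Int) × PySem.Set String) kv =>
        if hr.contains kv.1 then (st.1 ++ [kv], st.2.1, st.2.2)
        else if PySem.Set.contains st.2.2 kv.1 = false then (st.1, st.2.1 ++ [kv], PySem.Set.add st.2.2 kv.1)
        else st) (h, n, s)).1 = h ++ pvHeldOf hr cs := by
  intro cs
  induction cs with
  | nil => intro h n s; simp [pvHeldOf]
  | cons kv rest ih =>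
    intro h n s
    by_cases hc : hr.contains kv.1 = true
    · have hm : kv.1 ∈ hr := List.contains_iff_mem.1 hc
      simp only [List.foldl_cons, if_pos hc, ih]
      simp [pvHeldOf, hm]
    · have hm : kv.1 ∉ hr := fun hx => hc (List.contains_iff_mem.2 hx)
      by_cases hs : PySem.Set.contains s kv.1 = false
      · simp only [List.foldl_cons, if_neg hc, if_pos hs, ih]
        simp [pvHeldOf, hm]
      · simp only [List.foldl_cons, if_neg hc, if_neg hs, ih]
        simp [pvHeldOf, hm]

-- B's fold: new component
lemma foldB_snd (hr : List String) : ∀ (cs : List (String × Int)) (h : List (String × Int)) (n : List (String × Int)) (s : PySem.Set String),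
    (cs.foldl (fun (st : List (String × Int) × List (String × Int) × PySem.Set String) kv =>
        if hr.contains kv.1 then (st.1 ++ [kv], st.2.1, st.2.2)
        else if PySem.Set.contains st.2.2 kv.1 = false then (st.1, st.2.1 ++ [kv], PySem.Set.add st.2.2 kv.1)
        else st) (h, n, s)).2.1 = n ++ pvNewOf hr cs s := by
  intro cs
  induction cs with
  | nil => intro h n s; simp [pvNewOf]
  | cons kv rest ih =>
    intro h n s
    by_cases hc : hr.contains kv.1 = true
    · have hm : kv.1 ∈ hr := List.contains_iff_mem.1 hc
      simp only [List.foldl_cons, if_pos hc, ih]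
      simp [pvNewOf, hm]
    · have hm : kv.1 ∉ hr := fun hx => hc (List.contains_iff_mem.2 hx)
      by_cases hs : PySem.Set.contains s kv.1 = false
      · have hsm : kv.1 ∉ s := by
          intro hx
          simp [PySem.Set.contains] at hs
          exact hs hx
        simp only [List.foldl_cons, if_neg hc, if_pos hs, ih]
        simp [pvNewOf, hm, hsm]
      · have hsm : kv.1 ∈ s := by
          by_contra hx
          exact hs (by simpa [PySem.Set.contains, List.contains_iff_mem] using hx)
        simp only [List.foldl_cons, if_neg hc, if_neg hs, ih]
        simp [pvNewOf, hm, hsm]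

-- ===== VERDICT (by name: the statement is the Claim_ definition above) =====
theorem select_with_priority_py_spec : Claim_equal_select_with_priority_py := by
  intro candidates held_roots target_count reverse _
  unfold Spec_select_with_priority_py select_with_priority_py select_with_priority_py_alt
  simp only []
  rw [foldA_fst held_roots candidates [] PySem.Set.empty,
      foldB_fst held_roots candidates [] [] PySem.Set.empty,
      foldB_snd held_roots candidates [] [] PySem.Set.empty]
  simp only [List.nil_append]
  rw [loop2_eq held_roots target_count candidates (pvHeldOf held_roots candidates) _
        (fun k v hm hk => foldA_snd_mem held_roots candidates [] PySem.Set.empty k v hm hk)]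
  rw [newOf_congr held_roots candidates _ PySem.Set.empty ?_]
  · rw [PySem.List.slice_to _ (le_max_left 0 _)]
    have hmax : (max 0 (target_count - ((pvHeldOf held_roots candidates).length : Int))).toNat
        = (target_count - ((pvHeldOf held_roots candidates).length : Int)).toNat := by omega
    rw [hmax]
  · intro k hk
    constructor
    · intro hks
      exact absurd (foldA_snd_sub held_roots candidates [] PySem.Set.empty
        (by intro k' h'; simp [PySem.Set.empty] at h') k hks) hk
    · intro hks; simp [PySem.Set.empty] at hks
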